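-- pv_equiv track=rewrite | github.com/jfabdo/TreeMail | ParseFile.py | kickgarbage
-- ===== SOURCE A (Python) =====
-- def kickgarbage(emailist):
--     ouriter = list(range(len(emailist))) #wacky laughy hacky taffy
--     for i in ouriter:
--         if not emailist[i].strip() or emailist[i].strip() == "From:":
--             emailist.pop(i) #remove empty ent
--             ouriter.insert(i+1,i) #wacky laughy hacky taffy
--             ouriter.pop() #wacky laughy hacky taffy
--         else:
--             emailist[i] = emailist[i].strip()
--     return emailist
-- ===== SOURCE B (Python) =====
-- def kickgarbage(emailist):
--     # Single-pass in-place compaction with a write pointer, then one truncation.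
--     write = 0
--     for x in emailist:
--         s = x.strip()
--         if s and s != "From:":
--             emailist[write] = s
--             write += 1
--     del emailist[write:]
--     return emailist
-- ===== Notes on version B (the rewrite author's own statement) =====
-- stated objective: alternative
-- what changed: Replaces the pop/auxiliary-index-list juggling (each pop shifts the list tail and patches an iteration index list) with a single forward pass that compacts kept stripped lines via a write pointer and truncates once.
import Mathlib
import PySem

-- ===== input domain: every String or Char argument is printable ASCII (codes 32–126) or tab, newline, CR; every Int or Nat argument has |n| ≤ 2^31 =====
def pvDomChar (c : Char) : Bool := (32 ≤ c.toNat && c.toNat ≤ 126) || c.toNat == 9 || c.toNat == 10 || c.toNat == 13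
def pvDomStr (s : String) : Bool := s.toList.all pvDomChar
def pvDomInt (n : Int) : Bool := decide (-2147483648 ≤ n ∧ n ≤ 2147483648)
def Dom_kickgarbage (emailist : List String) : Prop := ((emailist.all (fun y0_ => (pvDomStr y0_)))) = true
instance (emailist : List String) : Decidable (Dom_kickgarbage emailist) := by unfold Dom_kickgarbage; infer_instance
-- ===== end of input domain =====

-- B strips each line in one forward pass, compacting kept lines with a write pointer and truncating
-- once, instead of A's repeated in-place pop with an auxiliary index list. Return value only is compared;
-- both Pythons mutate their argument in place.

-- ===== PORT A =====
-- The Python `for i in ouriter` walks ouriter by an internal cursor `pos` while ouriter is mutated;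
-- insert+pop keep ouriter's length constant, so the loop runs at most `emailist.length` steps (the fuel).
-- The dead `.getD` defaults are unreachable: Python's run never raises (indices stay in range).
def kickgarbageLoopA (fuel : Nat) (emailist : List String) (ouriter : List Int) (pos : Nat) :
    List String :=
  match fuel with
  | 0 => emailist
  | f + 1 =>
    match ouriter[pos]? with
    | none => emailist
    | some i =>
      let s := PySem.Str.strip (PySem.List.pyGetD emailist i "")
      if s = "" ∨ s = "From:" then
        let emailist' := ((PySem.List.pop? emailist i).map (·.2)).getD emailist  -- emailist.pop(i)
        let ouriter' := PySem.List.insert ouriter (i + 1) i                      -- ouriter.insert(i+1,i)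
        let ouriter'' := ((PySem.List.pop? ouriter').map (·.2)).getD ouriter'    -- ouriter.pop()
        kickgarbageLoopA f emailist' ouriter'' (pos + 1)
      else
        kickgarbageLoopA f (PySem.List.pySetD emailist i s) ouriter (pos + 1)    -- emailist[i] = strip

def kickgarbage (emailist : List String) : List String :=
  kickgarbageLoopA emailist.length emailist (PySem.List.pyRange 0 emailist.length) 0

-- ===== PORT B =====
-- `for x in emailist` reads the current list at an internal cursor r; writes land at w ≤ r.
def kickgarbageLoopB (fuel : Nat) (lst : List String) (r w : Nat) : List String × Nat :=
  match fuel with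
  | 0 => (lst, w)
  | f + 1 =>
    match lst[r]? with
    | none => (lst, w)
    | some x =>
      let s := PySem.Str.strip x
      if s ≠ "" ∧ s ≠ "From:" then
        kickgarbageLoopB f (lst.set w s) (r + 1) (w + 1)
      else
        kickgarbageLoopB f lst (r + 1) w

def kickgarbage_alt (emailist : List String) : List String :=
  let res := kickgarbageLoopB emailist.length emailist 0 0
  res.1.take res.2      -- del emailist[write:]

-- ===== PRECONDITION & SPEC =====
def Spec_kickgarbage (emailist : List String) (out : List String) : Prop := out = kickgarbage_alt emailist
instance (emailist : List String) (out : List String) : Decidable (Spec_kickgarbage emailist out) := by unfold Spec_kickgarbage; infer_instance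

-- ===== CLAIM (what is proved, stated in full; the proofs are below) =====
def Claim_equal_kickgarbage : Prop := ∀ (emailist : List String), Dom_kickgarbage emailist → Spec_kickgarbage emailist (kickgarbage emailist)

-- ===== LEMMAS AND PROOFS =====

-- Reference value: stripped lines that are neither blank nor "From:".
def kgRef (l : List String) : List String :=
  (l.map PySem.Str.strip).filter (fun s => !(s == "" || s == "From:"))

-- The still-unread part of ouriter: [base, base+1, ..., base+m-1].
def idxTail (base m : Nat) : List Int := (List.range m).map (fun k => ((base + k : Nat) : Int))

theorem idxTail_succ (b m : Nat) : idxTail b (m + 1) = (b : Int) :: idxTail (b + 1) m := by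
  simp only [idxTail, List.range_succ_eq_map, List.map_cons, List.map_map]
  refine List.cons_eq_cons.mpr ⟨by simp, ?_⟩
  apply List.map_congr_left
  intro k _
  simp only [Function.comp_apply]
  push_cast
  ring

theorem idxTail_snoc (b m : Nat) : idxTail b (m + 1) = idxTail b m ++ [((b + m : Nat) : Int)] := by
  simp [idxTail, List.range_succ]

theorem length_idxTail (b m : Nat) : (idxTail b m).length = m := by simp [idxTail]

theorem kgRef_cons (x : String) (l : List String) :
    kgRef (x :: l) =
      if PySem.Str.strip x = "" ∨ PySem.Str.strip x = "From:" then kgRef l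
      else PySem.Str.strip x :: kgRef l := by
  simp only [kgRef, List.map_cons, List.filter_cons]
  by_cases h : PySem.Str.strip x = "" ∨ PySem.Str.strip x = "From:"
  · have hb : (PySem.Str.strip x == "" || PySem.Str.strip x == "From:") = true := by
      rcases h with h | h <;> simp [h]
    simp [hb, h]
  · have h1 : ¬ PySem.Str.strip x = "" := fun hc => h (Or.inl hc)
    have h2 : ¬ PySem.Str.strip x = "From:" := fun hc => h (Or.inr hc)
    have hb : (PySem.Str.strip x == "" || PySem.Str.strip x == "From:") = false := by
      simp [h1, h2]
    simp [hb, h]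

theorem set_append_length (kept : List String) (x s : String) (rest : List String) :
    (kept ++ x :: rest).set kept.length s = kept ++ s :: rest := by
  induction kept with
  | nil => rfl
  | cons a t ih => simp [ih]

theorem eraseIdx_append_length {α : Type} (kept : List α) (x : α) (rest : List α) :
    (kept ++ x :: rest).eraseIdx kept.length = kept ++ rest := by
  induction kept with
  | nil => rfl
  | cons a t ih => simp [ih]

-- One drop step on ouriter: insert i at i+1 then pop the last element
-- turns junk ++ [b, b+1, …, b+m] into junk' ++ [b, b+1, …, b+m-1] with junk' one longer.
theorem ouriter_step (junk : List Int) (b m : Nat) (hb : b ≤ junk.length) :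
    ∃ junk' : List Int, junk'.length = junk.length + 1 ∧
      ((PySem.List.pop? (PySem.List.insert (junk ++ idxTail b (m + 1)) ((b : Int) + 1) (b : Int))).map
          (·.2)).getD (PySem.List.insert (junk ++ idxTail b (m + 1)) ((b : Int) + 1) (b : Int))
        = junk' ++ idxTail b m := by
  have hcast : ((b : Int) + 1) = ((b + 1 : Nat) : Int) := by push_cast; ring
  rw [hcast, PySem.List.insert_natCast _ (b + 1) _ (by simp [length_idxTail]; omega)]
  rcases Nat.lt_or_ge b junk.length with hlt | hge
  · -- insertion strictly inside junk
    rw [List.take_append_of_le_length (by omega), List.drop_append_of_le_length (by omega)]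
    rw [idxTail_snoc b m]
    refine ⟨junk.take (b + 1) ++ (b : Int) :: junk.drop (b + 1), by
      rw [List.length_append, List.length_take, List.length_cons, List.length_drop]; omega, ?_⟩
    rw [show junk.take (b + 1) ++ (b : Int) :: (junk.drop (b + 1) ++ (idxTail b m ++ [((b + m : Nat) : Int)]))
        = (junk.take (b + 1) ++ (b : Int) :: (junk.drop (b + 1) ++ idxTail b m)) ++ [((b + m : Nat) : Int)] by simp]
    rw [PySem.List.pop?_last]
    simp
  · -- b = junk.length: insertion at the boundary between junk and the tail
    have heq : b = junk.length := le_antisymm hb hge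
    rw [idxTail_succ b m, heq]
    rw [show junk ++ (junk.length : Int) :: idxTail (junk.length + 1) m
        = (junk ++ [(junk.length : Int)]) ++ idxTail (junk.length + 1) m by simp]
    rw [List.take_left' (by simp), List.drop_left' (by simp)]
    cases m with
    | zero =>
      refine ⟨junk ++ [(junk.length : Int)], by simp, ?_⟩
      simp only [idxTail, List.range_zero, List.map_nil, List.append_nil]
      rw [show (junk ++ [(junk.length : Int)]) ++ [(junk.length : Int)]
          = (junk ++ [(junk.length : Int)]) ++ [(junk.length : Int)] by rfl]
      rw [PySem.List.pop?_last]
      simp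
    | succ m' =>
      refine ⟨junk ++ [(junk.length : Int)], by simp, ?_⟩
      rw [idxTail_snoc (junk.length + 1) m']
      rw [show (junk ++ [(junk.length : Int)]) ++ (junk.length : Int) ::
            (idxTail (junk.length + 1) m' ++ [((junk.length + 1 + m' : Nat) : Int)])
          = ((junk ++ [(junk.length : Int)]) ++ (junk.length : Int) :: idxTail (junk.length + 1) m')
              ++ [((junk.length + 1 + m' : Nat) : Int)] by simp]
      rw [PySem.List.pop?_last]
      simp only [Option.map_some, Option.getD_some]
      rw [idxTail_succ junk.length m']

-- Invariant for A's loop: emailist = kept ++ rest; ouriter = consumed junk (length = cursor pos)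
-- followed by the unread indices kept.length, kept.length+1, …; kept.length ≤ junk.length.
theorem loopA_inv (rest : List String) (fuel : Nat) (kept : List String) (junk : List Int)
    (hfuel : rest.length ≤ fuel) (hkj : kept.length ≤ junk.length) :
    kickgarbageLoopA fuel (kept ++ rest) (junk ++ idxTail kept.length rest.length) junk.length
      = kept ++ kgRef rest := by
  induction rest generalizing fuel kept junk with
  | nil =>
    cases fuel with
    | zero => simp [kickgarbageLoopA, kgRef]
    | succ f =>
      have hnone : (junk ++ idxTail kept.length ([] : List String).length)[junk.length]? = none := by
        simp [idxTail]
      rw [kickgarbageLoopA, hnone]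
      simp [kgRef]
  | cons x rest' ih =>
    cases fuel with
    | zero => simp at hfuel
    | succ f =>
      have hread : (junk ++ idxTail kept.length (x :: rest').length)[junk.length]?
          = some (kept.length : Int) := by
        rw [List.getElem?_append_right (le_refl _)]
        rw [List.length_cons, idxTail_succ]
        simp
      have hget : PySem.Str.strip (PySem.List.pyGetD (kept ++ x :: rest') (kept.length : Int) "")
          = PySem.Str.strip x := by
        rw [PySem.List.pyGetD_natCast]
        simp [List.getD]
      rw [kickgarbageLoopA, hread]
      simp only [hget]
      by_cases hgarb : PySem.Str.strip x = "" ∨ PySem.Str.strip x = "From:"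
      · rw [if_pos hgarb]
        have hpop : ((PySem.List.pop? (kept ++ x :: rest') (kept.length : Int)).map (·.2)).getD
            (kept ++ x :: rest') = kept ++ rest' := by
          rw [PySem.List.pop?_natCast _ kept.length (by simp)]
          simp [eraseIdx_append_length]
        rw [hpop]
        obtain ⟨junk', hlen', hj'⟩ :=
          ouriter_step junk kept.length rest'.length hkj
        rw [show (x :: rest').length = rest'.length + 1 from rfl, hj']
        rw [show junk.length + 1 = junk'.length from hlen'.symm]
        rw [ih f kept junk' (by simp only [List.length_cons] at hfuel; omega) (by omega)]
        rw [kgRef_cons, if_pos hgarb]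
      · rw [if_neg hgarb]
        have hset : PySem.List.pySetD (kept ++ x :: rest') (kept.length : Int) (PySem.Str.strip x)
            = (kept ++ [PySem.Str.strip x]) ++ rest' := by
          rw [PySem.List.pySetD_natCast, set_append_length]
          simp
        rw [hset]
        have hrest : junk ++ idxTail kept.length (x :: rest').length
            = (junk ++ [(kept.length : Int)])
                ++ idxTail (kept ++ [PySem.Str.strip x]).length rest'.length := by
          rw [show (x :: rest').length = rest'.length + 1 from rfl, idxTail_succ]
          simp
        rw [hrest]
        rw [show junk.length + 1 = (junk ++ [(kept.length : Int)]).length by simp]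
        rw [ih f (kept ++ [PySem.Str.strip x]) (junk ++ [(kept.length : Int)])
            (by simp only [List.length_cons] at hfuel; omega) (by simp; omega)]
        rw [kgRef_cons, if_neg hgarb]
        simp

-- Invariant for B's loop: lst = out ++ mid ++ rest, write pointer = out.length,
-- read cursor = out.length + mid.length; the final take returns out ++ kgRef rest.
theorem loopB_inv (rest : List String) (fuel : Nat) (out mid : List String)
    (hfuel : rest.length ≤ fuel) :
    (kickgarbageLoopB fuel (out ++ (mid ++ rest)) (out.length + mid.length) out.length).1.take
      (kickgarbageLoopB fuel (out ++ (mid ++ rest)) (out.length + mid.length) out.length).2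
      = out ++ kgRef rest := by
  induction rest generalizing fuel out mid with
  | nil =>
    cases fuel with
    | zero => simp [kickgarbageLoopB, kgRef]
    | succ f =>
      have hnone : (out ++ (mid ++ ([] : List String)))[out.length + mid.length]? = none := by
        simp
      rw [kickgarbageLoopB, hnone]
      simp [kgRef]
  | cons x rest' ih =>
    cases fuel with
    | zero => simp at hfuel
    | succ f =>
      have hread : (out ++ (mid ++ x :: rest'))[out.length + mid.length]? = some x := by
        rw [show out ++ (mid ++ x :: rest') = (out ++ mid) ++ x :: rest' by simp]
        rw [List.getElem?_append_right (by simp)]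
        simp
      rw [kickgarbageLoopB]
      simp only [hread]
      by_cases hkeep : PySem.Str.strip x ≠ "" ∧ PySem.Str.strip x ≠ "From:"
      · rw [if_pos hkeep]
        cases mid with
        | nil =>
          have hset : (out ++ ([] ++ x :: rest')).set out.length (PySem.Str.strip x)
              = (out ++ [PySem.Str.strip x]) ++ ([] ++ rest') := by
            simp
          rw [hset]
          rw [show out.length + [].length + 1
              = (out ++ [PySem.Str.strip x]).length + ([] : List String).length by simp]
          rw [show out.length + 1 = (out ++ [PySem.Str.strip x]).length by simp]
          rw [ih f (out ++ [PySem.Str.strip x]) [] (by simp only [List.length_cons] at hfuel; omega)]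
          rw [kgRef_cons, if_neg (by tauto)]
          simp
        | cons m0 mid1 =>
          have hset : (out ++ (m0 :: mid1 ++ x :: rest')).set out.length (PySem.Str.strip x)
              = (out ++ [PySem.Str.strip x]) ++ ((mid1 ++ [x]) ++ rest') := by
            rw [show out ++ (m0 :: mid1 ++ x :: rest') = out ++ m0 :: (mid1 ++ x :: rest') by simp]
            rw [set_append_length]
            simp
          rw [hset]
          rw [show out.length + (m0 :: mid1).length + 1
              = (out ++ [PySem.Str.strip x]).length + (mid1 ++ [x]).length by simp; omega]
          rw [show out.length + 1 = (out ++ [PySem.Str.strip x]).length by simp]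
          rw [ih f (out ++ [PySem.Str.strip x]) (mid1 ++ [x]) (by simp only [List.length_cons] at hfuel; omega)]
          rw [kgRef_cons, if_neg (by tauto)]
          simp
      · rw [if_neg hkeep]
        rw [show out ++ (mid ++ x :: rest') = out ++ ((mid ++ [x]) ++ rest') by simp]
        rw [show out.length + mid.length + 1 = out.length + (mid ++ [x]).length by simp only [List.length_append, List.length_cons, List.length_nil]; omega]
        rw [ih f out (mid ++ [x]) (by simp only [List.length_cons] at hfuel; omega)]
        rw [kgRef_cons, if_pos (by tauto)]

-- ===== VERDICT (by name: the statement is the Claim_ definition above) =====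
theorem kickgarbage_spec : Claim_equal_kickgarbage := by
  intro emailist _
  unfold Spec_kickgarbage kickgarbage kickgarbage_alt
  have hA := loopA_inv emailist emailist.length [] [] (le_refl _) (le_refl _)
  have hB := loopB_inv emailist emailist.length [] [] (le_refl _)
  simp only [List.nil_append, List.length_nil] at hA hB
  rw [show PySem.List.pyRange 0 (emailist.length : Int) = idxTail 0 emailist.length by
    rw [PySem.List.pyRange_zero_natCast]; simp [idxTail]]
  rw [hA, ← hB]
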